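-- pv_equiv track=rewrite | github.com/dratcliff/advent-of-code | 2019/test_six.py | walk_orbits
-- ===== SOURCE A (Python) =====
-- def walk_orbits(tree, rootLabel, stopLabel, sum=0):
--     if stopLabel in tree[rootLabel]:
--         return (rootLabel, sum)
--     else:
--         for k in tree[rootLabel]:
--             if k in tree:
--                 result = walk_orbits(tree, k, stopLabel, sum=sum+1)
--                 if result != None:
--                     return result
-- ===== SOURCE B (Python) =====
-- def walk_orbits(tree, rootLabel, stopLabel, sum=0):
--     # Generate the DFS preorder of (node, depth) lazily, then scan it for the
--     # first node whose child list contains stopLabel.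
--     def preorder(node, depth):
--         yield (node, depth)
--         for k in tree[node]:
--             if k in tree:
--                 yield from preorder(k, depth + 1)
--     for node, depth in preorder(rootLabel, sum):
--         if stopLabel in tree[node]:
--             return (node, depth)
--     return None
-- ===== Notes on version B (the rewrite author's own statement) =====
-- stated objective: alternative
-- what changed: A fuses the stop-test into a recursive DFS with early return; B separates concerns: a generator lazily yields the DFS preorder of (node, depth) pairs and a plain scan returns the first pair whose child list contains stopLabel.
import Mathlib
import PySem

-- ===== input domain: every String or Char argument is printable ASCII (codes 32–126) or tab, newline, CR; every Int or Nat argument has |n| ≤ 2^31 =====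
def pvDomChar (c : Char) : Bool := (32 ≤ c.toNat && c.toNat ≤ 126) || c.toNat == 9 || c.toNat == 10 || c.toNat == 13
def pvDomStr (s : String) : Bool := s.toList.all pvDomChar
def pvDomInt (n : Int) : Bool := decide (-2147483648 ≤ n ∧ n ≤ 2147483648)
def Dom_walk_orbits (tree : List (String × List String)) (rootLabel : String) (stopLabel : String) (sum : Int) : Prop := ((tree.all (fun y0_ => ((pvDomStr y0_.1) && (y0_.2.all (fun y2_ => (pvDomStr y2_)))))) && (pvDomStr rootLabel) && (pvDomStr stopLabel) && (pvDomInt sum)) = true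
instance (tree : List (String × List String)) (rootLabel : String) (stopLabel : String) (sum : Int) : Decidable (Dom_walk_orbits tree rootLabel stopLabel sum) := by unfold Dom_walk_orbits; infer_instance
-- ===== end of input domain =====

-- B replaces A's fused recursive search by a generate-then-scan decomposition:
-- produce the DFS preorder of (node, depth) pairs, then take the first pair whose
-- child list contains stopLabel (objective: alternative; same value everywhere A returns).


-- ===== PORT A =====
-- A is a recursive DFS; the Nat fuel is ONLY a totality guard (Pre_ below keeps
-- the inputs where Python terminates normally: acyclic from the root, root a key;
-- there the recursion depth is bounded by the number of keys, so fuel tree.length+1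
-- is never exhausted). 'tree[k]' = first-match lookup, none = KeyError (excluded by Pre_).
mutual
def walkA (tree : List (String × List String)) (stopLabel : String) : Nat → String → Int → Option (String × Int)
  | 0, _, _ => none
  | f+1, node, s =>
    match (PySem.Dict.mk tree).get? node with
    | none => none  -- Python raises KeyError here (only reachable at the root; outside Pre_)
    | some children =>
      if stopLabel ∈ children then some (node, s)
      else loopA tree stopLabel f children s
  termination_by f _ _ => (f, 0)
def loopA (tree : List (String × List String)) (stopLabel : String) : Nat → List String → Int → Option (String × Int)
  | _, [], _ => none
  | f, k :: ks, s =>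
    if ((PySem.Dict.mk tree).get? k).isSome then
      match walkA tree stopLabel f k (s+1) with
      | some r => some r
      | none => loopA tree stopLabel f ks s
    else loopA tree stopLabel f ks s
  termination_by f ks _ => (f, ks.length + 1)
end

def walk_orbits (tree : List (String × List String)) (rootLabel : String) (stopLabel : String) (sum : Int) : Option (String × Int) :=
  walkA tree stopLabel (tree.length + 1) rootLabel sum

-- ===== PORT B =====
-- B: build the DFS preorder of (node, depth) pairs, then find the first pair whose
-- child list contains stopLabel. Same fuel guard as above.
mutual
def preB (tree : List (String × List String)) : Nat → String → Int → List (String × Int)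
  | 0, _, _ => []
  | f+1, node, d =>
    match (PySem.Dict.mk tree).get? node with
    | none => [(node, d)]  -- generator yields (node, d) before touching tree[node]; the scan then raises (outside Pre_)
    | some children => (node, d) :: preChildren tree f children d
  termination_by f _ _ => (f, 0)
def preChildren (tree : List (String × List String)) : Nat → List String → Int → List (String × Int)
  | _, [], _ => []
  | f, k :: ks, d =>
    (if ((PySem.Dict.mk tree).get? k).isSome then preB tree f k (d+1) else []) ++ preChildren tree f ks d
  termination_by f ks _ => (f, ks.length + 1)
end

def predB (tree : List (String × List String)) (stopLabel : String) (p : String × Int) : Bool :=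
  match (PySem.Dict.mk tree).get? p.1 with
  | some children => decide (stopLabel ∈ children)
  | none => false

def walk_orbits_alt (tree : List (String × List String)) (rootLabel : String) (stopLabel : String) (sum : Int) : Option (String × Int) :=
  (preB tree (tree.length + 1) rootLabel sum).find? (predB tree stopLabel)

-- ===== PRECONDITION & SPEC =====
-- Pre_ excludes the inputs where Python A raises: a rootLabel missing from the dict
-- (KeyError) and a cycle in the subgraph of non-answer keys (stopLabel not among their
-- children) reachable from the root through such keys (RecursionError).
def childKeys (tree : List (String × List String)) (stopLabel : String) (k : String) : List String :=
  match (PySem.Dict.mk tree).get? k with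
  | none => []
  | some children =>
    if stopLabel ∈ children then []  -- an answer node: the DFS never expands its children
    else children.filter (fun c => ((PySem.Dict.mk tree).get? c).isSome)

def grow (tree : List (String × List String)) (stopLabel : String) (s : List String) : List String :=
  (s ++ s.flatMap (childKeys tree stopLabel)).dedup

def descend (tree : List (String × List String)) (stopLabel : String) (k : String) : List String :=
  (grow tree stopLabel)^[tree.length] (childKeys tree stopLabel k)

def Pre_walk_orbits (tree : List (String × List String)) (rootLabel : String) (stopLabel : String) (sum : Int) : Prop :=
  ((PySem.Dict.mk tree).get? rootLabel).isSome = true ∧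
  ∀ k ∈ rootLabel :: descend tree stopLabel rootLabel, k ∉ descend tree stopLabel k
instance (tree : List (String × List String)) (rootLabel : String) (stopLabel : String) (sum : Int) : Decidable (Pre_walk_orbits tree rootLabel stopLabel sum) := by unfold Pre_walk_orbits; infer_instance

def pvWitness_walk_orbits : (List (String × List String)) × String × String × Int :=
  ([("COM", ["B"]), ("B", ["C", "D"]), ("C", []), ("D", ["E"])], "COM", "E", 0)

def Spec_walk_orbits (tree : List (String × List String)) (rootLabel : String) (stopLabel : String) (sum : Int) (out : Option (String × Int)) : Prop := out = walk_orbits_alt tree rootLabel stopLabel sum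
instance (tree : List (String × List String)) (rootLabel : String) (stopLabel : String) (sum : Int) (out : Option (String × Int)) : Decidable (Spec_walk_orbits tree rootLabel stopLabel sum out) := by unfold Spec_walk_orbits; infer_instance

-- ===== CLAIM (what is proved, stated in full; the proofs are below) =====
def Claim_equal_walk_orbits : Prop := ∀ (tree : List (String × List String)) (rootLabel : String) (stopLabel : String) (sum : Int), Dom_walk_orbits tree rootLabel stopLabel sum → Pre_walk_orbits tree rootLabel stopLabel sum → Spec_walk_orbits tree rootLabel stopLabel sum (walk_orbits tree rootLabel stopLabel sum)

-- ===== LEMMAS AND PROOFS =====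

-- Key invariant: for EVERY fuel value, A's fused search equals find? over B's preorder list.
theorem walkA_eq_find (tree : List (String × List String)) (stopLabel : String) :
    ∀ f : Nat, ∀ node : String, ∀ s : Int,
      walkA tree stopLabel f node s = (preB tree f node s).find? (predB tree stopLabel) := by
  intro f
  induction f with
  | zero => intro node s; simp [walkA, preB]
  | succ f ih =>
    have hloop : ∀ ks : List String, ∀ s : Int,
        loopA tree stopLabel f ks s = (preChildren tree f ks s).find? (predB tree stopLabel) := by
      intro ks
      induction ks with
      | nil => intro s; simp [loopA, preChildren]
      | cons k ks ihk =>
        intro s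
        rw [loopA, preChildren, List.find?_append]
        by_cases hk : ((PySem.Dict.mk tree).get? k).isSome
        · rw [if_pos hk, if_pos hk, ih]
          cases h : (preB tree f k (s+1)).find? (predB tree stopLabel) with
          | none => simp [ihk]
          | some r => simp
        · rw [if_neg hk, if_neg hk, ihk]
          simp
    intro node s
    rw [walkA, preB]
    cases h : (PySem.Dict.mk tree).get? node with
    | none =>
      simp [List.find?, predB, h]
    | some children =>
      by_cases hm : stopLabel ∈ children
      · simp [List.find?, predB, h, hm]
      · simp only [if_neg hm]
        rw [hloop]
        have hp : predB tree stopLabel (node, s) = false := by simp [predB, h, hm]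
        simp [List.find?, hp]

-- ===== VERDICT (by name: the statement is the Claim_ definition above) =====
theorem walk_orbits_spec : Claim_equal_walk_orbits := by
  intro tree rootLabel stopLabel sum _ _
  unfold Spec_walk_orbits walk_orbits walk_orbits_alt
  exact walkA_eq_find tree stopLabel (tree.length + 1) rootLabel sum
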